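-- pv_equiv track=rewrite | github.com/JBecnel/AdventOfCode2024 | problem22_part2.py | secret
-- ===== SOURCE A (Python) =====
-- def secret(num,iter=10):
--     prev_digit = num % 10
--     num_list = [ ]
--     for i in range(iter):
--         # step 1
--         result = num << 6
--         num = result ^ num
--         num = num % 16777216
--
--         # step 2
--         div_32 = num >> 5
--         num = div_32 ^ num
--         num = num % 16777216
--
--         # step 3
--         shift_11 = num << 11
--         num = shift_11 ^ num
--         num = num % 16777216
--
--         digit = num % 10
--         diff = digit - prev_digit
--         prev_digit = digit
--
--         num_list.append((digit, diff))
--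
--     return num_list
-- ===== SOURCE B (Python) =====
-- def secret(num, iter=10):
--     M = 1 << 24
--     W = 24
--
--     def mix(n):
--         # the PRNG round (used only to derive the 24 matrix columns below)
--         n = (n ^ (n << 6)) % M
--         n = (n ^ (n >> 5)) % M
--         return (n ^ (n << 11)) % M
--
--     # The round is GF(2)-linear on 24-bit states: precompute its matrix columns.
--     cols = [mix(1 << j) for j in range(W)]
--
--     def step(s):
--         # matrix-vector product over GF(2): xor the columns at s's set bits
--         acc = 0
--         for j in range(W):
--             if (s >> j) & 1:
--                 acc ^= cols[j]
--         return acc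
--
--     # The round depends only on the low 24 bits of its argument: reduce once.
--     s = num % M
--     digits = [num % 10]
--     for _ in range(iter):
--         s = step(s)
--         digits.append(s % 10)
--     return [(b, b - a) for a, b in zip(digits, digits[1:])]
-- ===== Notes on version B (the rewrite author's own statement) =====
-- stated objective: alternative
-- what changed: B exploits that the PRNG round is GF(2)-linear on 24-bit states: it precomputes the round's 24 matrix columns (round applied to each basis vector 1<<j), reduces the seed mod 2^24 once, and performs each iteration as a GF(2) matrix-vector product (xor of the columns at the state's set bits) instead of re-running the shift/xor/mask network; digits are collected in one list and differenced in a second pass.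
import Mathlib
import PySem

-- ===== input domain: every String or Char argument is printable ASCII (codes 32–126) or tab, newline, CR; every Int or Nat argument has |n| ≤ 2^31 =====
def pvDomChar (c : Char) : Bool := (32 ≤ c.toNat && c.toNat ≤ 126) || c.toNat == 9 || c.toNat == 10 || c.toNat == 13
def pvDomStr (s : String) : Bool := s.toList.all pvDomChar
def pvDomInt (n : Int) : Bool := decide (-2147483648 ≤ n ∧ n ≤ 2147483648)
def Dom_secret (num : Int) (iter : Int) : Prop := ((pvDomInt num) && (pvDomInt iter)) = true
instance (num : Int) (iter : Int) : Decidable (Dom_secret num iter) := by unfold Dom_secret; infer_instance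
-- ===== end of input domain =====

-- B re-implements A by a different algorithm: the PRNG round is GF(2)-linear on 24-bit
-- states, so B precomputes the round's 24 matrix columns once and performs each round as
-- a GF(2) matrix-vector product (xor of the columns at the state's set bits) after
-- reducing the seed mod 2^24 once; digits are collected and differenced in a second pass.

-- ===== PORT A =====
def secret (num : Int) (iter : Int) : List (Int × Int) :=
  let prev_digit := PySem.Int.mod num 10
  let st :=
    (PySem.List.pyRange 0 iter 1).foldl
      (fun (st : Int × Int × List (Int × Int)) _ =>
        let num := st.1
        -- step 1
        let result := num <<< (6 : Nat)
        let num := PySem.Int.mod (PySem.Int.bxor result num) 16777216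
        -- step 2
        let div_32 := num >>> (5 : Nat)
        let num := PySem.Int.mod (PySem.Int.bxor div_32 num) 16777216
        -- step 3
        let shift_11 := num <<< (11 : Nat)
        let num := PySem.Int.mod (PySem.Int.bxor shift_11 num) 16777216
        let digit := PySem.Int.mod num 10
        let diff := digit - st.2.1
        (num, digit, st.2.2 ++ [(digit, diff)]))
      (num, prev_digit, [])
  st.2.2

-- ===== PORT B =====
-- Source B's `mix` (the round, used only to derive the 24 matrix columns)
def pvMixB (n : Int) : Int :=
  let M : Int := (1 : Int) <<< (24 : Nat)
  let n := PySem.Int.mod (PySem.Int.bxor n (n <<< (6 : Nat))) M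
  let n := PySem.Int.mod (PySem.Int.bxor n (n >>> (5 : Nat))) M
  PySem.Int.mod (PySem.Int.bxor n (n <<< (11 : Nat))) M

-- Source B's `cols`: the matrix columns, the round applied to each basis vector 1 << j
def pvColsB : List Int := (PySem.List.pyRange 0 24 1).map (fun j => pvMixB ((1 : Int) <<< j.toNat))

-- Source B's `step`: GF(2) matrix-vector product — xor the columns at s's set bits
def pvStepB (s : Int) : Int :=
  (PySem.List.pyRange 0 24 1).foldl
    (fun acc j =>
      if PySem.Int.band (s >>> j.toNat) 1 ≠ 0 then PySem.Int.bxor acc (PySem.List.pyGetD pvColsB j 0)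
      else acc)
    0

def secret_alt (num : Int) (iter : Int) : List (Int × Int) :=
  let M : Int := (1 : Int) <<< (24 : Nat)
  let st :=
    (PySem.List.pyRange 0 iter 1).foldl
      (fun (st : Int × List Int) _ =>
        let s := pvStepB st.1
        (s, st.2 ++ [PySem.Int.mod s 10]))
      (PySem.Int.mod num M, [PySem.Int.mod num 10])
  (st.2.zip (PySem.List.slice st.2 (some 1) none)).map (fun p => (p.2, p.2 - p.1))

-- ===== PRECONDITION & SPEC =====
def Spec_secret (num : Int) (iter : Int) (out : List (Int × Int)) : Prop := out = secret_alt num iter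
instance (num : Int) (iter : Int) (out : List (Int × Int)) : Decidable (Spec_secret num iter out) := by unfold Spec_secret; infer_instance

-- ===== CLAIM (what is proved, stated in full; the proofs are below) =====
def Claim_equal_secret : Prop := ∀ (num : Int) (iter : Int), Dom_secret num iter → Spec_secret num iter (secret num iter)

-- ===== LEMMAS AND PROOFS =====

/-- The three sub-rounds and the full round, on 24-bit Nat states. -/
def pvG1 (a : Nat) : Nat := (a ^^^ (a <<< 6)) % 2 ^ 24
def pvG2 (a : Nat) : Nat := (a ^^^ (a >>> 5)) % 2 ^ 24
def pvG3 (a : Nat) : Nat := (a ^^^ (a <<< 11)) % 2 ^ 24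
def pvF (a : Nat) : Nat := pvG3 (pvG2 (pvG1 a))

theorem pvF_lt (a : Nat) : pvF a < 2 ^ 24 := by
  unfold pvF pvG3; exact Nat.mod_lt _ (by norm_num)

-- complement on w bits as xor with the all-ones word
theorem pvCompl (w : Nat) : ∀ x : Nat, x < 2 ^ w → (2 ^ w - 1) ^^^ x = 2 ^ w - 1 - x := by
  induction w with
  | zero => intro x hx; interval_cases x; simp
  | succ w ih =>
    intro x hx
    have hp : (0:Nat) < 2 ^ w := Nat.two_pow_pos w
    have hs : (2:Nat) ^ (w+1) = 2 * 2 ^ w := by ring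
    have e := Nat.div_add_mod ((2 ^ (w+1) - 1) ^^^ x) 2
    rw [Nat.xor_div_two, Nat.xor_mod_two_eq] at e
    have ha : (2 ^ (w+1) - 1) / 2 = 2 ^ w - 1 := by omega
    have hx2 : x / 2 < 2 ^ w := by omega
    rw [ha, ih _ hx2] at e
    omega

theorem pvTestBit64 (k i : Nat) : (64 * k + 63).testBit i = (decide (i < 6) || k.testBit (i - 6)) := by
  rcases Nat.lt_or_ge i 6 with h | h
  · have h1 : (64 * k + 63) / 2 ^ i % 2 = 1 := by interval_cases i <;> omega
    simp [Nat.testBit_eq_decide_div_mod_eq, h1, h]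
  · have h2 : (2:Nat) ^ i = 2 ^ 6 * 2 ^ (i - 6) := by
      rw [← pow_add]; congr 1; omega
    have h3 : (64 * k + 63) / 2 ^ i = k / 2 ^ (i - 6) := by
      rw [h2, ← Nat.div_div_eq_div_mul]
      congr 1
      omega
    simp [Nat.testBit_eq_decide_div_mod_eq, h3, Nat.not_lt.mpr h]

-- gi are GF(2)-linear
theorem pvG1_xor (a b : Nat) : pvG1 (a ^^^ b) = pvG1 a ^^^ pvG1 b := by
  unfold pvG1
  apply Nat.eq_of_testBit_eq
  intro i
  simp only [Nat.testBit_mod_two_pow, Nat.testBit_xor, Nat.testBit_shiftLeft, ge_iff_le]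
  by_cases h1 : i < 24 <;> by_cases h2 : 6 ≤ i <;>
    simp [h1, h2] <;>
    cases a.testBit i <;> cases b.testBit i <;>
    cases a.testBit (i - 6) <;> cases b.testBit (i - 6) <;> simp

theorem pvG2_xor (a b : Nat) : pvG2 (a ^^^ b) = pvG2 a ^^^ pvG2 b := by
  unfold pvG2
  apply Nat.eq_of_testBit_eq
  intro i
  simp only [Nat.testBit_mod_two_pow, Nat.testBit_xor, Nat.testBit_shiftRight]
  by_cases h1 : i < 24 <;>
    simp [h1] <;>
    cases a.testBit i <;> cases b.testBit i <;>
    cases a.testBit (5 + i) <;> cases b.testBit (5 + i) <;> simp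

theorem pvG3_xor (a b : Nat) : pvG3 (a ^^^ b) = pvG3 a ^^^ pvG3 b := by
  unfold pvG3
  apply Nat.eq_of_testBit_eq
  intro i
  simp only [Nat.testBit_mod_two_pow, Nat.testBit_xor, Nat.testBit_shiftLeft, ge_iff_le]
  by_cases h1 : i < 24 <;> by_cases h2 : 11 ≤ i <;>
    simp [h1, h2] <;>
    cases a.testBit i <;> cases b.testBit i <;>
    cases a.testBit (i - 11) <;> cases b.testBit (i - 11) <;> simp

theorem pvF_xor (a b : Nat) : pvF (a ^^^ b) = pvF a ^^^ pvF b := by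
  unfold pvF; rw [pvG1_xor, pvG2_xor, pvG3_xor]

-- the round depends only on the low 24 bits of its argument
theorem pvG1_mod (a : Nat) : pvG1 (a % 2 ^ 24) = pvG1 a := by
  unfold pvG1
  apply Nat.eq_of_testBit_eq
  intro i
  simp only [Nat.testBit_mod_two_pow, Nat.testBit_xor, Nat.testBit_shiftLeft, ge_iff_le]
  by_cases h1 : i < 24 <;> by_cases h2 : 6 ≤ i <;> by_cases h3 : i - 6 < 24 <;>
    simp [h1, h2, h3] <;> omega

-- two's complement: the first sub-round on a negative argument -(k+1)
theorem pvG1_neg (k : Nat) :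
    ((64 * k + 63) ^^^ k) % 2 ^ 24 = pvG1 (2 ^ 24 - 1 - k % 2 ^ 24) := by
  have hk : k % 2 ^ 24 < 2 ^ 24 := Nat.mod_lt _ (by norm_num)
  rw [← pvCompl 24 (k % 2 ^ 24) hk]
  unfold pvG1
  apply Nat.eq_of_testBit_eq
  intro i
  simp only [Nat.testBit_mod_two_pow, Nat.testBit_xor, Nat.testBit_shiftLeft,
    Nat.testBit_two_pow_sub_one, pvTestBit64, ge_iff_le]
  by_cases h1 : i < 24 <;> by_cases h2 : 6 ≤ i <;> by_cases h3 : i - 6 < 24 <;>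
    simp [h1, h2, h3] <;>
    cases k.testBit i <;> cases k.testBit (i - 6) <;> simp <;> omega

-- ===== Int bridges =====

-- stage 1 of A's round, on an arbitrary Int state (two's complement for negative n)
theorem pvStage1A (n : Int) :
    PySem.Int.mod (PySem.Int.bxor (n <<< (6 : Nat)) n) 16777216
      = ((pvG1 ((n % 16777216).toNat) : Nat) : Int) := by
  by_cases hn : (0:Int) ≤ n
  · obtain ⟨a, rfl⟩ := Int.eq_ofNat_of_zero_le hn
    rw [← Int.natCast_shiftLeft, PySem.Int.bxor_natCast]
    have h16 : (16777216 : Int) = ((16777216 : Nat) : Int) := by norm_num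
    rw [h16, PySem.Int.mod_natCast, ← Int.natCast_mod, Int.toNat_natCast]
    congr 1
    show (a <<< 6 ^^^ a) % 2 ^ 24 = pvG1 (a % 2 ^ 24)
    rw [pvG1_mod]
    unfold pvG1
    rw [Nat.xor_comm]
  · obtain ⟨k, rfl⟩ : ∃ k : Nat, n = -(↑k + 1) := ⟨(-n - 1).toNat, by omega⟩
    have hs : (-(↑k + 1) : Int) <<< (6 : Nat) = -↑(64 * k + 63) - 1 := by
      rw [Int.shiftLeft_eq']; push_cast; ring
    rw [hs]
    have hb : PySem.Int.bxor (-↑(64 * k + 63) - 1) (-((k : Int) + 1))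
        = ((((64 * k + 63) ^^^ k : Nat)) : Int) := by
      simp only [PySem.Int.bxor]
      have c1 : ¬ (0:Int) ≤ -↑(64 * k + 63) - 1 := by omega
      have c2 : ¬ (0:Int) ≤ -((k : Int) + 1) := by omega
      rw [if_neg c1, if_neg c2]
      congr 2 <;> omega
    rw [hb]
    have h16 : (16777216 : Int) = ((16777216 : Nat) : Int) := by norm_num
    rw [h16, PySem.Int.mod_natCast]
    have ht : ((-(↑k + 1) : Int) % ((16777216 : Nat) : Int)).toNat = 2 ^ 24 - 1 - k % 2 ^ 24 := by
      have hpow : (2:Nat) ^ 24 = 16777216 := by norm_num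
      have hc : ((16777216 : Nat) : Int) = 16777216 := by norm_num
      rw [hc]
      omega
    rw [ht]
    have h := pvG1_neg k
    norm_num at h
    exact congrArg (fun x : Nat => (x : Int)) h

-- stages 2 and 3, on a nonnegative (cast) state
theorem pvStages23 (a : Nat) :
    PySem.Int.mod
        (PySem.Int.bxor
          ((PySem.Int.mod (PySem.Int.bxor (((a : Nat) : Int) >>> (5 : Nat)) ((a : Nat) : Int)) 16777216) <<< (11 : Nat))
          (PySem.Int.mod (PySem.Int.bxor (((a : Nat) : Int) >>> (5 : Nat)) ((a : Nat) : Int)) 16777216))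
        16777216
      = ((pvG3 (pvG2 a) : Nat) : Int) := by
  have h16 : (16777216 : Int) = ((16777216 : Nat) : Int) := by norm_num
  rw [← Int.natCast_shiftRight, PySem.Int.bxor_natCast, h16, PySem.Int.mod_natCast,
      ← Int.natCast_shiftLeft, PySem.Int.bxor_natCast, PySem.Int.mod_natCast]
  have h : (((a >>> 5 ^^^ a) % 16777216) <<< 11 ^^^ (a >>> 5 ^^^ a) % 16777216) % 16777216
      = pvG3 (pvG2 a) := by
    simp only [pvG2, pvG3, (by norm_num : (2:Nat) ^ 24 = 16777216)]
    rw [Nat.xor_comm (a >>> 5) a, Nat.xor_comm _ ((a ^^^ a >>> 5) % 16777216)]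
  exact congrArg (fun x : Nat => (x : Int)) h

-- stages 2 and 3 in B's orientation (Source B writes n ^ (n >> 5), n ^ (n << 11))
theorem pvStages23B (a : Nat) :
    PySem.Int.mod
        (PySem.Int.bxor
          (PySem.Int.mod (PySem.Int.bxor ((a : Nat) : Int) (((a : Nat) : Int) >>> (5 : Nat))) 16777216)
          ((PySem.Int.mod (PySem.Int.bxor ((a : Nat) : Int) (((a : Nat) : Int) >>> (5 : Nat))) 16777216) <<< (11 : Nat)))
        16777216
      = ((pvG3 (pvG2 a) : Nat) : Int) := by
  have h16 : (16777216 : Int) = ((16777216 : Nat) : Int) := by norm_num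
  rw [← Int.natCast_shiftRight, PySem.Int.bxor_natCast, h16, PySem.Int.mod_natCast,
      ← Int.natCast_shiftLeft, PySem.Int.bxor_natCast, PySem.Int.mod_natCast]
  have h : ((a ^^^ a >>> 5) % 16777216 ^^^ ((a ^^^ a >>> 5) % 16777216) <<< 11) % 16777216
      = pvG3 (pvG2 a) := by
    simp only [pvG2, pvG3, (by norm_num : (2:Nat) ^ 24 = 16777216)]
  exact congrArg (fun x : Nat => (x : Int)) h

-- A's full round equals the Nat round on the reduced state
theorem pvRoundA_eq (n : Int) :
    PySem.Int.mod
        (PySem.Int.bxor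
          ((PySem.Int.mod
              (PySem.Int.bxor ((PySem.Int.mod (PySem.Int.bxor (n <<< (6 : Nat)) n) 16777216) >>> (5 : Nat))
                (PySem.Int.mod (PySem.Int.bxor (n <<< (6 : Nat)) n) 16777216))
              16777216) <<< (11 : Nat))
          (PySem.Int.mod
            (PySem.Int.bxor ((PySem.Int.mod (PySem.Int.bxor (n <<< (6 : Nat)) n) 16777216) >>> (5 : Nat))
              (PySem.Int.mod (PySem.Int.bxor (n <<< (6 : Nat)) n) 16777216))
            16777216))
        16777216
      = ((pvF ((n % 16777216).toNat) : Nat) : Int) := by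
  rw [pvStage1A]
  exact pvStages23 _

-- B's mix equals the Nat round on the reduced state
theorem pvMixB_eq (n : Int) : pvMixB n = ((pvF ((n % 16777216).toNat) : Nat) : Int) := by
  have hM : ((1 : Int) <<< (24 : Nat)) = 16777216 := by
    rw [Int.shiftLeft_eq']; norm_num
  simp only [pvMixB, hM]
  rw [PySem.Int.bxor_comm n (n <<< (6 : Nat)), pvStage1A n]
  exact pvStages23B _

-- Python's truthiness test `(s >> j) & 1` on a nonnegative state is the j-th bit
theorem pvBit (a j : Nat) : (PySem.Int.band (((a : Nat) : Int) >>> ((j : Nat) : Int)) 1 ≠ 0) ↔ a.testBit j := by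
  rw [Int.shiftRight_natCast]
  have h1 : (1 : Int) = ((1 : Nat) : Int) := by norm_num
  rw [h1, PySem.Int.band_natCast, Nat.and_one_is_mod]
  simp only [ne_eq, Int.natCast_eq_zero, Nat.testBit_eq_decide_div_mod_eq,
    Nat.shiftRight_eq_div_pow, decide_eq_true_eq]
  omega

-- peeling one bit off the low-w-bits residue
theorem pvModSucc (a w : Nat) :
    a % 2 ^ (w + 1) = (if a.testBit w then 2 ^ w else 0) ^^^ (a % 2 ^ w) := by
  apply Nat.eq_of_testBit_eq
  intro i
  rcases Nat.lt_trichotomy i w with h | h | h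
  · rw [Nat.testBit_mod_two_pow, decide_eq_true (by omega : i < w + 1)]
    by_cases hb : a.testBit w <;>
      simp [hb, Nat.testBit_xor, Nat.testBit_mod_two_pow, Nat.testBit_two_pow,
        decide_eq_true h, decide_eq_false (by omega : ¬ w = i)]
  · subst h
    rw [Nat.testBit_mod_two_pow, decide_eq_true (by omega : i < i + 1)]
    by_cases hb : a.testBit i <;>
      simp [hb, Nat.testBit_xor, Nat.testBit_mod_two_pow, Nat.testBit_two_pow]
  · rw [Nat.testBit_mod_two_pow, decide_eq_false (by omega : ¬ i < w + 1)]
    by_cases hb : a.testBit w <;>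
      simp [hb, Nat.testBit_xor, Nat.testBit_mod_two_pow, Nat.testBit_two_pow,
        decide_eq_false (by omega : ¬ i < w), decide_eq_false (by omega : ¬ w = i)]

-- the j-th matrix column is the round of the j-th basis vector
theorem pvColsB_get (j : Nat) (hj : j < 24) :
    PySem.List.pyGetD pvColsB ((j : Nat) : Int) 0 = ((pvF (2 ^ j) : Nat) : Int) := by
  unfold pvColsB
  have h24 : (24 : Int) = ((24 : Nat) : Int) := by norm_num
  rw [h24, PySem.List.pyGetD_map_pyRange _ 24 j 0 hj]
  simp only [Int.toNat_natCast]
  have h1 : ((1 : Int) <<< ((j : Nat) : Int)) = (((2 ^ j : Nat)) : Int) := by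
    rw [show (1 : Int) = ((1 : Nat) : Int) by norm_num, Int.shiftLeft_natCast, Nat.one_shiftLeft]
  rw [h1, pvMixB_eq]
  congr 1
  have hlt : (2 : Nat) ^ j < 16777216 := by
    calc (2:Nat) ^ j < 2 ^ 24 := Nat.pow_lt_pow_right (by norm_num) hj
    _ = 16777216 := by norm_num
  have h2 : (((2 ^ j : Nat) : Int)) % 16777216 = (((2 ^ j : Nat)) : Int) :=
    Int.emod_eq_of_lt (by positivity) (by exact_mod_cast hlt)
  rw [h2, Int.toNat_natCast]

-- the column-xor fold reconstructs the round bit by bit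
theorem pvFoldB (a : Nat) (w : Nat) (hw : w ≤ 24) (x : Nat) :
    (List.range w).foldl
      (fun (acc : Int) (j : Nat) =>
        if PySem.Int.band (((a : Nat) : Int) >>> ((j : Nat) : Int)) 1 ≠ 0
        then PySem.Int.bxor acc (PySem.List.pyGetD pvColsB ((j : Nat) : Int) 0)
        else acc)
      ((x : Nat) : Int)
    = (((x ^^^ pvF (a % 2 ^ w) : Nat)) : Int) := by
  induction w with
  | zero =>
    rw [show a % 2 ^ 0 = 0 by omega, show pvF 0 = 0 by decide, Nat.xor_zero]
    simp
  | succ w ih =>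
    rw [List.range_succ, List.foldl_append, ih (by omega)]
    simp only [List.foldl_cons, List.foldl_nil]
    by_cases hb : a.testBit w
    · rw [if_pos ((pvBit a w).mpr hb), pvColsB_get w (by omega), PySem.Int.bxor_natCast]
      rw [pvModSucc a w, if_pos hb, pvF_xor]
      congr 1
      rw [Nat.xor_assoc]
      congr 1
      exact Nat.xor_comm _ _
    · rw [if_neg (fun hc => hb ((pvBit a w).mp hc))]
      rw [pvModSucc a w, if_neg hb, Nat.zero_xor]

-- B's step equals the Nat round on 24-bit states
theorem pvStepB_eq (a : Nat) (ha : a < 2 ^ 24) : pvStepB ((a : Nat) : Int) = ((pvF a : Nat) : Int) := by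
  unfold pvStepB
  have h24 : (24 : Int) = ((24 : Nat) : Int) := by norm_num
  rw [h24, PySem.List.pyRange_zero_natCast, List.foldl_map]
  have hf := pvFoldB a 24 le_rfl 0
  rw [Nat.mod_eq_of_lt ha, Nat.zero_xor] at hf
  norm_num at hf ⊢
  exact hf

-- ===== pairing machinery (B's second pass) =====

/-- The diff pairs of a digit list: zip with its own tail, next-minus-prev. -/
def pvPairs (ds : List Int) : List (Int × Int) :=
  (ds.zip ds.tail).map (fun p => (p.2, p.2 - p.1))

theorem pvPairs_snoc (ds : List Int) (d d' : Int) :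
    pvPairs (ds ++ [d] ++ [d']) = pvPairs (ds ++ [d]) ++ [(d', d' - d)] := by
  induction ds with
  | nil => simp [pvPairs]
  | cons x t ih =>
    cases t with
    | nil => simp [pvPairs]
    | cons y u =>
      simp only [pvPairs, List.cons_append, List.tail_cons, List.zip_cons_cons,
        List.map_cons] at ih ⊢
      exact congrArg _ ih

-- ===== the main loop correspondence =====

theorem pvLoop (l : List Int) (n : Int) (ds : List Int) :
    (l.foldl
      (fun (st : Int × Int × List (Int × Int)) _ =>
        let num := st.1
        let result := num <<< (6 : Nat)
        let num := PySem.Int.mod (PySem.Int.bxor result num) 16777216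
        let div_32 := num >>> (5 : Nat)
        let num := PySem.Int.mod (PySem.Int.bxor div_32 num) 16777216
        let shift_11 := num <<< (11 : Nat)
        let num := PySem.Int.mod (PySem.Int.bxor shift_11 num) 16777216
        let digit := PySem.Int.mod num 10
        let diff := digit - st.2.1
        (num, digit, st.2.2 ++ [(digit, diff)]))
      (n, PySem.Int.mod n 10, pvPairs (ds ++ [PySem.Int.mod n 10]))).2.2
    = pvPairs ((l.foldl
        (fun (st : Int × List Int) _ =>
          let s := pvStepB st.1
          (s, st.2 ++ [PySem.Int.mod s 10]))
        ((((n % 16777216).toNat : Nat) : Int), ds ++ [PySem.Int.mod n 10])).2) := by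
  induction l generalizing n ds with
  | nil => simp
  | cons y t ih =>
    simp only [List.foldl_cons]
    have hm : (n % 16777216).toNat < 2 ^ 24 := by
      have h1 := Int.emod_nonneg n (by norm_num : (16777216:Int) ≠ 0)
      have h2 := Int.emod_lt_of_pos n (by norm_num : (0:Int) < 16777216)
      have hpow : (2:Nat) ^ 24 = 16777216 := by norm_num
      omega
    have hround := pvRoundA_eq n
    have hstep := pvStepB_eq _ hm
    have hmod : ((pvF ((n % 16777216).toNat) : Nat) : Int) % 16777216
        = ((pvF ((n % 16777216).toNat) : Nat) : Int) := by
      have h1 := pvF_lt ((n % 16777216).toNat)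
      have hpow : (2:Nat) ^ 24 = 16777216 := by norm_num
      refine Int.emod_eq_of_lt (by positivity) (by exact_mod_cast (hpow ▸ h1))
    have h2 := ih ((pvF ((n % 16777216).toNat) : Nat) : Int) (ds ++ [PySem.Int.mod n 10])
    rw [hmod, Int.toNat_natCast, pvPairs_snoc] at h2
    rw [hround, hstep]
    exact h2

-- ===== VERDICT (by name: the statement is the Claim_ definition above) =====
theorem secret_spec : Claim_equal_secret := by
  intro num iter _
  unfold Spec_secret secret secret_alt
  have hM : ((1 : Int) <<< (24 : Nat)) = 16777216 := by
    rw [Int.shiftLeft_eq']; norm_num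
  have hinit : PySem.Int.mod num 16777216 = (((num % 16777216).toNat : Nat) : Int) := by
    rw [PySem.Int.mod_eq_emod_of_pos (by norm_num)]
    have h1 := Int.emod_nonneg num (by norm_num : (16777216:Int) ≠ 0)
    omega
  have h := pvLoop (PySem.List.pyRange 0 iter 1) num []
  simp only [PySem.List.slice_from_one, hM, hinit]
  simpa [pvPairs] using h
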